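-- pv_equiv track=rewrite | github.com/wzwhit/leetcode | 剑指offer/面13机器人的运动范围.py | check
-- ===== SOURCE A (Python) =====
-- def check(i, j, k):
--     c = 0
--     while i:
--         c += i % 10
--         i //= 10
--     while j:
--         c += j % 10
--         j //= 10
--     if c > k:
--         return False
--     else:
--         return True
-- ===== SOURCE B (Python) =====
-- def check(i, j, k):
--     digits = str(i) + str(j)
--     return sum(int(d) for d in digits) <= k
-- ===== Notes on version B (the rewrite author's own statement) =====
-- stated objective: idiomatic
-- what changed: B computes the digit sums by iterating over the decimal string representations (sum(int(d) for d in str(i)+str(j))) instead of A's two arithmetic peeling loops with % 10 and //= 10, and returns the comparison directly.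
import Mathlib
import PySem

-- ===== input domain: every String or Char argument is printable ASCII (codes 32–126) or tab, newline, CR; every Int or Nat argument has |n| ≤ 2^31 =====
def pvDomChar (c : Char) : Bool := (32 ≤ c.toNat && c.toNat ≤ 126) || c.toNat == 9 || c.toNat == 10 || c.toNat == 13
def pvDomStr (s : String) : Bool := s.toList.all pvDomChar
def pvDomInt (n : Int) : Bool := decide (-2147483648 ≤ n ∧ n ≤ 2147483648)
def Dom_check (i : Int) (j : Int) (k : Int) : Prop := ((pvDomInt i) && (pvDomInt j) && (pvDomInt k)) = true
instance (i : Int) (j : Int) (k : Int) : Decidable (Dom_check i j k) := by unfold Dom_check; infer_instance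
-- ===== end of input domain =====

-- ===== PORT A =====
-- A peels digits arithmetically (% 10, //= 10). The while loops become fuel recursion;
-- fuel n.toNat+1 never runs out on the admitted nonnegative inputs (the loop state strictly
-- decreases), so this is a faithful transliteration on Pre_check.
def loopA : Nat → Int → Int → Int
  | 0, _, c => c
  | fuel + 1, i, c =>
      if i ≠ 0 then loopA fuel (PySem.Int.floordiv i 10) (c + PySem.Int.mod i 10) else c

def check (i : Int) (j : Int) (k : Int) : Bool :=
  let c := loopA (i.toNat + 1) i 0
  let c := loopA (j.toNat + 1) j c
  if c > k then false else true

-- ===== PORT B =====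
-- int(d) for a single character, exact on digit characters (the only ones reached inside Pre_check)
def digitVal (c : Char) : Int := (PySem.Int.ofChars? [c]).getD 0

def check_alt (i : Int) (j : Int) (k : Int) : Bool :=
  let digits := PySem.Int.toChars i ++ PySem.Int.toChars j  -- str(i) + str(j)
  decide (((digits.map digitVal).sum) ≤ k)

-- ===== PRECONDITION & SPEC =====
-- Pre_check excludes negative i or j: A's `while i: ... i //= 10` never terminates on a
-- negative argument (floor division stalls at -1), so A returns no value there.
def Pre_check (i : Int) (j : Int) (k : Int) : Prop := 0 ≤ i ∧ 0 ≤ j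
instance (i : Int) (j : Int) (k : Int) : Decidable (Pre_check i j k) := by unfold Pre_check; infer_instance
def pvWitness_check : Int × Int × Int := (35, 7, 12)
def Spec_check (i : Int) (j : Int) (k : Int) (out : Bool) : Prop := out = check_alt i j k
instance (i : Int) (j : Int) (k : Int) (out : Bool) : Decidable (Spec_check i j k out) := by unfold Spec_check; infer_instance

-- ===== CLAIM (what is proved, stated in full; the proofs are below) =====
def Claim_equal_check : Prop := ∀ (i : Int) (j : Int) (k : Int), Dom_check i j k → Pre_check i j k → Spec_check i j k (check i j k)

-- ===== LEMMAS AND PROOFS =====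

-- digit value of the digit characters Nat.toDigits produces
theorem digitVal_digitChar (d : Nat) (h : d < 10) : digitVal (Nat.digitChar d) = (d : Int) := by
  interval_cases d <;> decide

-- sum of digit values of Nat.toDigitsCore = digit sum (Nat.digits 10) plus the accumulator
theorem toDigitsCore_sum (fuel : Nat) : ∀ (n : Nat) (ds : List Char), n < fuel →
    ((Nat.toDigitsCore 10 fuel n ds).map digitVal).sum
      = ((Nat.digits 10 n).sum : Int) + ((ds.map digitVal).sum) := by
  induction fuel with
  | zero => intro n ds h; omega
  | succ f ih =>
    intro n ds h
    rw [Nat.toDigitsCore]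
    by_cases h0 : n / 10 = 0
    · rw [if_pos h0]
      rcases Nat.eq_zero_or_pos n with hn | hn
      · subst hn; simp [digitVal_digitChar 0 (by omega)]
      · have hlt : n < 10 := by omega
        rw [Nat.digits_def' (by omega : 1 < 10) hn, h0]
        simp [Nat.mod_eq_of_lt hlt]
        exact digitVal_digitChar n (by omega)
    · rw [if_neg h0]
      have hn : 0 < n := by
        by_contra hz
        have : n = 0 := by omega
        subst this; simp at h0
      have hrec : n / 10 < f := by
        have := Nat.div_lt_self hn (by omega : 1 < 10)
        omega
      rw [ih (n / 10) _ hrec, Nat.digits_def' (by omega : 1 < 10) hn]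
      rw [List.map_cons, List.sum_cons,
        digitVal_digitChar (n % 10) (Nat.mod_lt _ (by omega))]
      push_cast [List.map_cons, List.sum_cons]
      ring

theorem toChars_sum (i : Int) (hi : 0 ≤ i) :
    (((PySem.Int.toChars i).map digitVal).sum) = ((Nat.digits 10 i.toNat).sum : Int) := by
  unfold PySem.Int.toChars
  rw [if_neg (by omega)]
  unfold Nat.toDigits
  rw [toDigitsCore_sum (i.toNat + 1) i.toNat [] (by omega)]
  simp

-- A's peeling loop computes the same digit sum
theorem loopA_sum (fuel : Nat) : ∀ (i c : Int), 0 ≤ i → i.toNat < fuel →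
    loopA fuel i c = c + ((Nat.digits 10 i.toNat).sum : Int) := by
  induction fuel with
  | zero => intro i c _ h; omega
  | succ f ih =>
    intro i c hi h
    rw [loopA]
    by_cases h0 : i = 0
    · subst h0; simp
    · rw [if_pos h0]
      have hfd : PySem.Int.floordiv i 10 = i / 10 :=
        Int.fdiv_eq_ediv_of_nonneg i (by omega)
      have hmd : PySem.Int.mod i 10 = i % 10 :=
        Int.fmod_eq_emod_of_nonneg i (by omega)
      have htn : (i / 10).toNat = i.toNat / 10 := by omega
      have hnpos : 0 < i.toNat := by omega
      have hlt : (PySem.Int.floordiv i 10).toNat < f := by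
        rw [hfd, htn]
        have := Nat.div_lt_self hnpos (by omega : 1 < 10)
        omega
      rw [ih _ _ (by rw [hfd]; positivity) hlt, hfd, hmd, htn,
        Nat.digits_def' (by omega : 1 < 10) hnpos]
      have hmc : i % 10 = ((i.toNat % 10 : Nat) : Int) := by omega
      rw [hmc, List.sum_cons]
      push_cast
      ring

-- ===== VERDICT (by name: the statement is the Claim_ definition above) =====
theorem check_spec : Claim_equal_check := by
  intro i j k _ hpre
  obtain ⟨hi, hj⟩ := hpre
  unfold Spec_check check check_alt
  simp only
  rw [loopA_sum _ i 0 hi (by omega), loopA_sum _ j _ hj (by omega),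
    List.map_append, List.sum_append, toChars_sum i hi, toChars_sum j hj]
  by_cases hc : (0 : Int) + ((Nat.digits 10 i.toNat).sum : Int) + ((Nat.digits 10 j.toNat).sum : Int) > k
  · rw [if_pos hc]
    symm
    rw [decide_eq_false_iff_not]
    omega
  · rw [if_neg hc]
    symm
    rw [decide_eq_true_eq]
    omega
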